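-- pv_equiv track=rewrite | github.com/pypi-data/pypi-mirror-17 | packages/sve_common_tools/sve_common_tools-0.1.6.57.tar.gz/sve_common_tools-0.1.6.57/sve_common_tools/Sve_file_utils.py | parse_extact_table
-- ===== SOURCE A (Python) =====
-- def parse_extact_table(multiline_str, header_column_position):
--     result = []
--     for out_result_row in multiline_str.splitlines():
--         arr = []
--         for i in range(0, len(header_column_position)):
--             start_pos = header_column_position[i][0]
--             if header_column_position[i][1] is None:
--                 if i < len(header_column_position) - 1:
--                     end_pos = header_column_position[i + 1][0] - 1
--                 else:
--                     end_pos = len(out_result_row)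
--             else:
--                 end_pos = header_column_position[i][1] - 1
--             d = out_result_row[start_pos:end_pos].strip()
--             arr.append(d)
--         result.append(arr)
--
--     if len(result) == 0:
--         raise Exception('TI_Utilis', 'No param list (' + str + ')')
--     return result
-- ===== SOURCE B (Python) =====
-- def parse_extact_table(multiline_str, header_column_position):
--     # Column-major: build one full column of cells at a time, then transpose into rows.
--     lines = multiline_str.splitlines()
--     n = len(header_column_position)
--     cols = []
--     for j, (s, e) in enumerate(header_column_position):
--         if e is not None:
--             end = e - 1
--         elif j < n - 1:
--             end = header_column_position[j + 1][0] - 1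
--         else:
--             end = None
--         cols.append([line[s:end].strip() for line in lines])
--     result = [[col[i] for col in cols] for i in range(len(lines))]
--     if len(result) == 0:
--         raise Exception('TI_Utilis', 'No param list (' + str + ')')
--     return result
-- ===== Notes on version B (the rewrite author's own statement) =====
-- stated objective: alternative
-- what changed: B parses the table column-major: for each header column it computes that column's end bound once and extracts the whole column of stripped cells across all lines, then a transposing pass over the line indices assembles the rows, instead of A's row-major loop that recomputes every column's bounds inside each line.
import Mathlib
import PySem

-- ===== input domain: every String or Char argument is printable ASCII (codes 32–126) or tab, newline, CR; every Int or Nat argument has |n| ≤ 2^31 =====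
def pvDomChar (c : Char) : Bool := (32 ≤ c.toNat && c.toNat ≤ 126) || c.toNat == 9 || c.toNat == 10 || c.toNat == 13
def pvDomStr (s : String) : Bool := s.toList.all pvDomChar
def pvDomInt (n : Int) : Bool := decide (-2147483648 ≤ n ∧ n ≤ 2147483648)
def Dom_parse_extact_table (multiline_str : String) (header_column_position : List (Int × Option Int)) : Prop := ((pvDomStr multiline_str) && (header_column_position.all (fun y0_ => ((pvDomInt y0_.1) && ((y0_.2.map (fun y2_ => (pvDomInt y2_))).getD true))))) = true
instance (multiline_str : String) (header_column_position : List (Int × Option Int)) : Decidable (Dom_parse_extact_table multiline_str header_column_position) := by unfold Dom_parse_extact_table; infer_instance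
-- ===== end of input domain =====

-- B builds the table column-major (one full column of cells per header entry, then a
-- transposing pass over the line indices) instead of A's row-major per-line column loop;
-- same cost, a genuinely different traversal order.


-- ===== PORT A =====
def parse_extact_table (multiline_str : String) (header_column_position : List (Int × Option Int)) : List (List String) :=
  (PySem.Str.splitlines multiline_str).foldl (fun result out_result_row =>
    result ++ [(PySem.List.pyRange 0 (header_column_position.length : Int)).foldl (fun arr i =>
      let start_pos := (PySem.List.pyGetD header_column_position i ((0 : Int), (none : Option Int))).1
      let end_pos : Int :=
        match (PySem.List.pyGetD header_column_position i ((0 : Int), (none : Option Int))).2 with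
        | none =>
            if i < (header_column_position.length : Int) - 1 then
              (PySem.List.pyGetD header_column_position (i + 1) ((0 : Int), (none : Option Int))).1 - 1
            else PySem.Str.len out_result_row
        | some e => e - 1
      arr ++ [PySem.Str.strip (PySem.Str.slice out_result_row (some start_pos) (some end_pos))]) []]) []
-- (A's final `raise` on an empty result is excluded by Pre_ below.)

-- ===== PORT B =====
def parse_extact_table_alt (multiline_str : String) (header_column_position : List (Int × Option Int)) : List (List String) :=
  let lines := PySem.Str.splitlines multiline_str
  let n : Int := (header_column_position.length : Int)
  let cols := (PySem.List.enumerate header_column_position).foldl (fun cols p =>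
    let j := p.1
    let s := p.2.1
    let endOpt : Option Int :=
      match p.2.2 with
      | some e => some (e - 1)
      | none =>
          if j < n - 1 then
            some ((PySem.List.pyGetD header_column_position (j + 1) ((0 : Int), (none : Option Int))).1 - 1)
          else none
    cols ++ [lines.map (fun line => PySem.Str.strip (PySem.Str.slice line (some s) endOpt))]) []
  (PySem.List.pyRange 0 (lines.length : Int)).map (fun i =>
    cols.map (fun col => PySem.List.pyGetD col i ""))
-- (B keeps A's final `raise` on an empty result; excluded by Pre_ below.)

-- ===== PRECONDITION & SPEC =====
-- Pre_ excludes only the empty string, the one input where splitlines() is empty and A's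
-- (type-broken) raise statement fires instead of returning.
def Pre_parse_extact_table (multiline_str : String) (header_column_position : List (Int × Option Int)) : Prop := multiline_str ≠ ""
instance (multiline_str : String) (header_column_position : List (Int × Option Int)) : Decidable (Pre_parse_extact_table multiline_str header_column_position) := by unfold Pre_parse_extact_table; infer_instance
def pvWitness_parse_extact_table : String × (List (Int × Option Int)) := ("ab cd\nef  g", [(0, some 3), (3, none)])

def Spec_parse_extact_table (multiline_str : String) (header_column_position : List (Int × Option Int)) (out : List (List String)) : Prop := out = parse_extact_table_alt multiline_str header_column_position
instance (multiline_str : String) (header_column_position : List (Int × Option Int)) (out : List (List String)) : Decidable (Spec_parse_extact_table multiline_str header_column_position out) := by unfold Spec_parse_extact_table; infer_instance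

-- ===== CLAIM (what is proved, stated in full; the proofs are below) =====
def Claim_equal_parse_extact_table : Prop := ∀ (multiline_str : String) (header_column_position : List (Int × Option Int)), Dom_parse_extact_table multiline_str header_column_position → Pre_parse_extact_table multiline_str header_column_position → Spec_parse_extact_table multiline_str header_column_position (parse_extact_table multiline_str header_column_position)

-- ===== LEMMAS AND PROOFS =====

-- slicing up to exactly len(s) is slicing to the end
theorem pv_slice_len (s : String) (a : Int) :
    PySem.Str.slice s (some a) (some (s.length : Int)) = PySem.Str.slice s (some a) none := by
  simp [PySem.Str.slice, PySem.List.slice, PySem.List.clampIdx]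
  congr 2

-- ===== VERDICT (by name: the statement is the Claim_ definition above) =====
theorem parse_extact_table_spec : Claim_equal_parse_extact_table := by
  intro ms h _dom _pre
  unfold Spec_parse_extact_table parse_extact_table parse_extact_table_alt
  simp only [PySem.List.foldl_append_singleton_eq_map, List.nil_append,
    PySem.List.pyRange_zero_natCast, List.map_map]
  set lines := PySem.Str.splitlines ms with hl
  apply List.ext_getElem
  · simp
  · intro i hi1 hi2
    simp only [List.getElem_map, List.getElem_range, Function.comp_apply]
    have hiL : i < lines.length := by simpa using hi1
    apply List.ext_getElem
    · simp [PySem.List.length_enumerate]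
    · intro j hj1 hj2
      have hjn : j < h.length := by simpa using hj1
      simp only [List.getElem_map, List.getElem_range, Function.comp_apply,
        PySem.List.getElem_enumerate]
      rw [PySem.List.pyGetD_natCast, List.getD_eq_getElem h _ hjn]
      have hget : ∀ (o : Option Int),
          PySem.List.pyGetD (lines.map (fun line =>
            PySem.Str.strip (PySem.Str.slice line (some h[j].1) o))) (i : Int) ""
          = PySem.Str.strip (PySem.Str.slice lines[i] (some h[j].1) o) := by
        intro o
        rw [PySem.List.pyGetD_natCast]
        simp [List.getD_eq_getElem?_getD, List.getElem?_eq_getElem (by simpa using hiL : i < lines.length)]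
      cases h[j].2 with
      | some e => simp only [hget]
      | none =>
        rw [hget]
        simp only [zero_add]
        by_cases hlt : (j : Int) < (h.length : Int) - 1
        · simp [hlt]
        · simp [hlt, pv_slice_len]
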